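-- pv_equiv track=rewrite | github.com/mollila666/AlgTekP1 | KNN/src/knn/test_class.py | tarkasta
-- ===== SOURCE A (Python) =====
-- def tarkasta(nr_t):
--     """
--     Luodaan tarkistettava boolean alue
--     Ympyran sisaan jaavat pikselit
--     nr_t on ympyran halkaisija
--     """
--     tarkasta = []
--     nr=int(nr_t/2)
--     for dy in range(-nr, nr+1):
--         for dx in range(-nr, nr+1):
--             arvo = dy**2 + dx**2
--             tarkasta.append((dy, dx, arvo))
--     tarkasta.sort(key=lambda x: x[2])
--     return tarkasta
-- ===== SOURCE B (Python) =====
-- def tarkasta(nr_t):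
--     """Single flat-index loop dropping tuples into distance buckets, then
--     concatenating the buckets -- no nested loops and no comparison sort."""
--     nr = int(nr_t / 2)
--     if nr < 0:
--         return []
--     n = 2 * nr + 1
--     buckets = [[] for _ in range(2 * nr * nr + 1)]
--     for i in range(n * n):
--         dy = i // n - nr
--         dx = i % n - nr
--         arvo = dy * dy + dx * dx
--         buckets[arvo].append((dy, dx, arvo))
--     out = []
--     for b in buckets:
--         out += b
--     return out
-- ===== Notes on version B (the rewrite author's own statement) =====
-- stated objective: alternative
-- what changed: Replaces A's nested generation loops plus comparison sort by a single flat-index loop (row/column recovered by divmod) that drops each tuple straight into a bucket indexed by its integer squared-distance key, then concatenates the buckets, so no comparison sort happens at all.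
import Mathlib
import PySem

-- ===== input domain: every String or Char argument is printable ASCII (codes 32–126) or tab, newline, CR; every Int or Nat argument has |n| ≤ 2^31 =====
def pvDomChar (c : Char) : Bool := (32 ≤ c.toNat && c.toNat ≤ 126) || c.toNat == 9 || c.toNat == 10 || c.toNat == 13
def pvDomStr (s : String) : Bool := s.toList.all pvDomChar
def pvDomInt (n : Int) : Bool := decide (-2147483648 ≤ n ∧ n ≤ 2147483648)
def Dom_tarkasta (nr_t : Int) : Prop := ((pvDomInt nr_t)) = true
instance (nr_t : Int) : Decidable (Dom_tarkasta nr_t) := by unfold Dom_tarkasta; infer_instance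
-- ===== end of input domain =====

-- B replaces A's nested loops + comparison sort by one flat-index loop (divmod recovers the
-- row/column) filling buckets indexed by the squared distance, concatenated in order
-- (objective: alternative algorithm; not measurably faster in CPython).

-- ===== PORT A =====
def tarkasta (nr_t : Int) : List (Int × Int × Int) :=
  let nr := nr_t.tdiv 2          -- int(nr_t/2): exact for |nr_t| ≤ 2^31, truncation toward zero
  let base :=
    (PySem.List.pyRange (-nr) (nr+1)).foldl (fun acc dy =>
      (PySem.List.pyRange (-nr) (nr+1)).foldl (fun acc2 dx =>
        acc2 ++ [(dy, dx, dy^2 + dx^2)]) acc) []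
  PySem.List.sorted base (fun x => x.2.2)

-- ===== PORT B =====
def tarkasta_alt (nr_t : Int) : List (Int × Int × Int) :=
  let nr := nr_t.tdiv 2
  if nr < 0 then [] else
  let n := 2*nr + 1
  let buckets :=
    (PySem.List.pyRange 0 (n*n)).foldl (fun bs i =>
      let dy := PySem.Int.floordiv i n - nr
      let dx := PySem.Int.mod i n - nr
      bs.modify (dy*dy + dx*dx).toNat (fun b => b ++ [(dy, dx, dy*dy + dx*dx)]))
      (Array.replicate (2*nr*nr + 1).toNat [])
  buckets.toList.foldl (fun out b => out ++ b) []

-- ===== PRECONDITION & SPEC =====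
def Spec_tarkasta (nr_t : Int) (out : List (Int × Int × Int)) : Prop := out = tarkasta_alt nr_t
instance (nr_t : Int) (out : List (Int × Int × Int)) : Decidable (Spec_tarkasta nr_t out) := by unfold Spec_tarkasta; infer_instance

-- ===== CLAIM (what is proved, stated in full; the proofs are below) =====
def Claim_equal_tarkasta : Prop := ∀ (nr_t : Int), Dom_tarkasta nr_t → Spec_tarkasta nr_t (tarkasta nr_t)

-- ===== LEMMAS AND PROOFS =====

-- the flat list of generated tuples, in A's generation order
def pvProd (nr : Int) : List (Int × Int × Int) :=
  (PySem.List.pyRange (-nr) (nr+1)).flatMap (fun dy =>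
    (PySem.List.pyRange (-nr) (nr+1)).map (fun dx => (dy, dx, dy*dy + dx*dx)))

theorem pv_mem_prod (nr : Int) (x : Int × Int × Int) (hx : x ∈ pvProd nr) :
    0 ≤ x.2.2 ∧ x.2.2 < 2*nr*nr + 1 := by
  obtain ⟨dy, hdy, hx2⟩ := List.mem_flatMap.mp hx
  obtain ⟨dx, hdx, rfl⟩ := List.mem_map.mp hx2
  rw [PySem.List.mem_pyRange_one] at hdy hdx
  constructor <;> nlinarith [hdy.1, hdy.2, hdx.1, hdx.2]

-- A's nested append loops build exactly the flat product list
theorem pv_base_eq (nr : Int) :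
    ((PySem.List.pyRange (-nr) (nr+1)).foldl (fun acc dy =>
      (PySem.List.pyRange (-nr) (nr+1)).foldl (fun acc2 dx =>
        acc2 ++ [(dy, dx, dy^2 + dx^2)]) acc) []) = pvProd nr := by
  simp only [PySem.List.foldl_append_singleton_eq_map]
  rw [PySem.List.foldl_append_eq_flatMap]
  simp [pvProd, pow_two]

theorem pv_insertBy_append_of_not {α : Type} (before : α → α → Bool) (a : α)
    (P Q : List α) (h : ∀ y ∈ P, before a y = false) :
    PySem.List.insertBy before a (P ++ Q) = P ++ PySem.List.insertBy before a Q := by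
  induction P with
  | nil => simp
  | cons y t ih =>
      rw [List.cons_append, PySem.List.insertBy, h y List.mem_cons_self]
      simp only [Bool.false_eq_true, if_false, List.cons_append]
      rw [ih (fun z hz => h z (List.mem_cons_of_mem _ hz))]

theorem pv_insertBy_all_before {α : Type} (before : α → α → Bool) (a : α)
    (Q : List α) (h : ∀ y ∈ Q, before a y = true) :
    PySem.List.insertBy before a Q = a :: Q := by
  cases Q with
  | nil => rfl
  | cons y t => rw [PySem.List.insertBy, h y List.mem_cons_self]; simp

-- stable insertion drops the new element at the END of its key bucket
theorem pv_insertBy_flatMap {α : Type} (key : α → Int) (a : α) (V : List Int)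
    (B : Int → List α) (hV : V.Pairwise (· < ·))
    (hB : ∀ v ∈ V, ∀ x ∈ B v, key x = v) (ha : key a ∈ V) :
    PySem.List.insertBy (fun p q => decide (key p < key q)) a (V.flatMap B) =
      V.flatMap (fun v => B v ++ if key a = v then [a] else []) := by
  induction V with
  | nil => exact absurd ha (List.not_mem_nil)
  | cons v V' ih =>
      rw [List.flatMap_cons, List.flatMap_cons]
      by_cases hav : key a = v
      · have h1 : ∀ y ∈ B v, (fun p q => decide (key p < key q)) a y = false := by
          intro y hy
          have := hB v List.mem_cons_self y hy
          simp [this, hav]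
        rw [pv_insertBy_append_of_not _ _ _ _ h1]
        have h2 : ∀ y ∈ V'.flatMap B, (fun p q => decide (key p < key q)) a y = true := by
          intro y hy
          obtain ⟨w, hw, hyw⟩ := List.mem_flatMap.mp hy
          have hky := hB w (List.mem_cons_of_mem _ hw) y hyw
          have hlt : v < w := (List.pairwise_cons.mp hV).1 w hw
          simp [hky, hav]; omega
        rw [pv_insertBy_all_before _ _ _ h2, if_pos hav]
        have : V'.flatMap (fun w => B w ++ if key a = w then [a] else []) = V'.flatMap B := by
          apply List.flatMap_congr
          intro w hw
          have hlt : v < w := (List.pairwise_cons.mp hV).1 w hw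
          rw [if_neg (by omega), List.append_nil]
        rw [this]; simp
      · have haV' : key a ∈ V' := by
          rcases List.mem_cons.mp ha with h | h
          · exact absurd h hav
          · exact h
        have h1 : ∀ y ∈ B v, (fun p q => decide (key p < key q)) a y = false := by
          intro y hy
          have hky := hB v List.mem_cons_self y hy
          have hlt : v < key a := (List.pairwise_cons.mp hV).1 (key a) haV'
          simp [hky]; omega
        rw [pv_insertBy_append_of_not _ _ _ _ h1,
          ih (List.pairwise_cons.mp hV).2 (fun w hw => hB w (List.mem_cons_of_mem _ hw)) haV',
          if_neg hav]
        simp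

-- stable sort = concatenation of key buckets, for any strictly increasing cover V of the keys
theorem pv_sorted_eq_buckets {α : Type} (key : α → Int) (L : List α) (V : List Int)
    (hV : V.Pairwise (· < ·)) (hL : ∀ x ∈ L, key x ∈ V) :
    PySem.List.sorted L key = V.flatMap (fun v => L.filter (fun x => decide (key x = v))) := by
  rw [PySem.List.sorted_eq_foldl_insertBy]
  induction L using List.reverseRecOn with
  | nil => simp
  | append_singleton M a ih =>
      rw [List.foldl_append, List.foldl_cons, List.foldl_nil,
        ih (fun x hx => hL x (List.mem_append_left _ hx))]
      rw [pv_insertBy_flatMap key a V _ hV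
        (fun v _ x hx => of_decide_eq_true (List.mem_filter.mp hx).2)
        (hL a (List.mem_append_right _ List.mem_cons_self))]
      apply List.flatMap_congr
      intro v _
      rw [List.filter_append]
      congr 1
      by_cases h : key a = v <;> simp [List.filter, h]

-- flat Nat index: range (a*n) scanned by (div, mod) is the row-by-row double loop
theorem pv_range_mul {β : Type} (f : Nat → Nat → β) (a n : Nat) (hn : 0 < n) :
    (List.range (a*n)).map (fun i => f (i/n) (i%n)) =
      (List.range a).flatMap (fun q => (List.range n).map (fun r => f q r)) := by
  induction a with
  | zero => simp
  | succ a ih =>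
      have h2 : (List.range n).map ((fun i => f (i/n) (i%n)) ∘ (fun r => a*n + r)) =
          (List.range n).map (fun r => f a r) := by
        apply List.map_congr_left
        intro r hr
        have hrn : r < n := List.mem_range.mp hr
        have hd : (a*n + r) / n = a := by
          rw [Nat.mul_comm a n, Nat.mul_add_div hn, Nat.div_eq_of_lt hrn]
          omega
        have hm : (a*n + r) % n = r := by
          rw [Nat.mul_comm a n, Nat.mul_add_mod, Nat.mod_eq_of_lt hrn]
        simp only [Function.comp_apply, hd, hm]
      rw [Nat.succ_mul, List.range_add, List.map_append, ih, List.map_map, h2,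
        List.range_succ, List.flatMap_append]
      simp

-- B's flat-index loop generates exactly A's tuples in A's order
theorem pv_flat_eq_prod (nr : Int) (h0 : 0 ≤ nr) :
    (PySem.List.pyRange 0 ((2*nr+1)*(2*nr+1))).map
      (fun i => (PySem.Int.floordiv i (2*nr+1) - nr, PySem.Int.mod i (2*nr+1) - nr,
        (PySem.Int.floordiv i (2*nr+1) - nr)*(PySem.Int.floordiv i (2*nr+1) - nr)
          + (PySem.Int.mod i (2*nr+1) - nr)*(PySem.Int.mod i (2*nr+1) - nr))) = pvProd nr := by
  obtain ⟨m, rfl⟩ := Int.eq_ofNat_of_zero_le h0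
  have hN : (2*(m:Int)+1) = ((2*m+1 : Nat) : Int) := by push_cast; ring
  have hNN : ((2*(m:Int)+1)*(2*(m:Int)+1) - 0).toNat = (2*m+1) * (2*m+1) := by
    rw [hN, sub_zero, ← Nat.cast_mul, Int.toNat_natCast]
  rw [PySem.List.pyRange_one, hNN, List.map_map]
  have hstep : ∀ i : Nat,
      ((fun i => (PySem.Int.floordiv i (2*(m:Int)+1) - m, PySem.Int.mod i (2*(m:Int)+1) - m,
        (PySem.Int.floordiv i (2*(m:Int)+1) - m)*(PySem.Int.floordiv i (2*(m:Int)+1) - m)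
          + (PySem.Int.mod i (2*(m:Int)+1) - m)*(PySem.Int.mod i (2*(m:Int)+1) - m))) ∘
        (fun k : Nat => (0:Int) + k)) i =
      (fun q r : Nat => (((q:Int) - m, (r:Int) - m,
        ((q:Int) - m)*((q:Int) - m) + ((r:Int) - m)*((r:Int) - m)))) (i/(2*m+1)) (i%(2*m+1)) := by
    intro i
    simp only [Function.comp, zero_add, hN, PySem.Int.floordiv_natCast, PySem.Int.mod_natCast]
  rw [List.map_congr_left (fun i _ => hstep i),
    pv_range_mul (fun q r : Nat => (((q:Int) - m, (r:Int) - m,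
      ((q:Int) - m)*((q:Int) - m) + ((r:Int) - m)*((r:Int) - m)))) (2*m+1) (2*m+1) (by omega)]
  simp only [pvProd, PySem.List.pyRange_one]
  have hlen : ((m:Int) + 1 - -(m:Int)).toNat = 2*m+1 := by omega
  rw [hlen, List.flatMap_map]
  apply List.flatMap_congr
  intro q _
  rw [List.map_map]
  apply List.map_congr_left
  intro r _
  simp only [Function.comp]
  have h1 : -(m:Int) + q = (q:Int) - m := by ring
  have h2 : -(m:Int) + r = (r:Int) - m := by ring
  rw [h1, h2]

theorem pv_fold_size {α : Type} (key : α → Int) (L : List α) (arr : Array (List α)) :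
    (L.foldl (fun bs t => bs.modify (key t).toNat (fun b => b ++ [t])) arr).size = arr.size := by
  induction L generalizing arr with
  | nil => rfl
  | cons x t ih => simp [List.foldl_cons, ih, Array.size_modify]

theorem pv_getD_eq {α : Type} (a : Array (List α)) (v : Nat) (h : v < a.size) :
    a.getD v [] = a[v] := by
  simp [Array.getD, h]

-- B's array fold, entrywise: bucket v collects exactly the key-v tuples, in order
theorem pv_fold_get {α : Type} (key : α → Int) (L : List α) (arr : Array (List α))
    (v : Nat) (hv : v < arr.size) :
    (L.foldl (fun bs t => bs.modify (key t).toNat (fun b => b ++ [t])) arr).getD v [] =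
      arr.getD v [] ++ L.filter (fun t => decide ((key t).toNat = v)) := by
  induction L generalizing arr with
  | nil => simp
  | cons x t ih =>
      rw [List.foldl_cons]
      rw [ih (arr.modify (key x).toNat (fun b => b ++ [x])) (by simpa using hv)]
      rw [pv_getD_eq _ _ (by simpa using hv), pv_getD_eq _ _ hv, Array.getElem_modify]
      by_cases h : (key x).toNat = v
      · rw [if_pos h, List.filter_cons, if_pos (by simp [h])]
        simp
      · rw [if_neg h, List.filter_cons, if_neg (by simp [h])]

-- B as a flatMap of filters over the key range
theorem pv_alt_eq (nr_t : Int) (h : ¬ nr_t.tdiv 2 < 0) :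
    tarkasta_alt nr_t =
      (List.range (2*(nr_t.tdiv 2)*(nr_t.tdiv 2) + 1).toNat).flatMap
        (fun v => (pvProd (nr_t.tdiv 2)).filter (fun t => decide ((t.2.2).toNat = v))) := by
  set nr := nr_t.tdiv 2 with hnr
  show (if nr < 0 then _ else _) = _
  rw [if_neg h]
  have hfold :
      ((PySem.List.pyRange 0 ((2*nr+1)*(2*nr+1))).foldl (fun bs i =>
        let dy := PySem.Int.floordiv i (2*nr+1) - nr
        let dx := PySem.Int.mod i (2*nr+1) - nr
        bs.modify (dy*dy + dx*dx).toNat (fun b => b ++ [(dy, dx, dy*dy + dx*dx)]))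
        (Array.replicate (2*nr*nr + 1).toNat [])) =
      (pvProd nr).foldl
        (fun bs t => bs.modify (t.2.2).toNat (fun b => b ++ [t]))
        (Array.replicate (2*nr*nr + 1).toNat []) := by
    rw [← pv_flat_eq_prod nr (by omega), List.foldl_map]
  show ((PySem.List.pyRange 0 ((2*nr+1)*(2*nr+1))).foldl _ _ : Array (List (Int × Int × Int))).toList.foldl (fun out b => out ++ b) [] = _
  rw [hfold]
  have hsz : ((pvProd nr).foldl
      (fun bs t => bs.modify (t.2.2).toNat (fun b => b ++ [t]))
      (Array.replicate (2*nr*nr + 1).toNat [])).size = (2*nr*nr + 1).toNat := by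
    rw [pv_fold_size]; simp
  have hlist : ((pvProd nr).foldl
      (fun bs t => bs.modify (t.2.2).toNat (fun b => b ++ [t]))
      (Array.replicate (2*nr*nr + 1).toNat [])).toList =
      (List.range (2*nr*nr + 1).toNat).map
        (fun v => (pvProd nr).filter (fun t => decide ((t.2.2).toNat = v))) := by
    apply List.ext_getElem
    · simp [Array.length_toList, hsz]
    · intro i h1 h2
      rw [Array.getElem_toList]
      have hi : i < (Array.replicate (2*nr*nr + 1).toNat ([] : List (Int × Int × Int))).size := by
        simpa using (by simpa [Array.length_toList, hsz] using h1 : i < (2*nr*nr + 1).toNat)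
      rw [← pv_getD_eq _ _ (by rw [pv_fold_size]; exact hi),
        pv_fold_get _ _ _ i hi, pv_getD_eq _ _ hi, Array.getElem_replicate]
      simp
  rw [hlist, PySem.List.foldl_append_eq_flatMap, List.nil_append, List.flatMap_map]

theorem pv_tarkasta_eq_alt (nr_t : Int) : tarkasta nr_t = tarkasta_alt nr_t := by
  by_cases hneg : nr_t.tdiv 2 < 0
  · have hnil : PySem.List.pyRange (-(nr_t.tdiv 2)) (nr_t.tdiv 2 + 1) = [] :=
      PySem.List.pyRange_one_eq_nil (by omega)
    show PySem.List.sorted _ _ = (if nr_t.tdiv 2 < 0 then _ else _)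
    rw [if_pos hneg, hnil]
    simp [PySem.List.sorted_eq_nil_iff]
  · show PySem.List.sorted _ _ = _
    rw [pv_base_eq]
    rw [pv_sorted_eq_buckets (fun x => x.2.2) (pvProd (nr_t.tdiv 2))
        (PySem.List.pyRange 0 (2*(nr_t.tdiv 2)*(nr_t.tdiv 2) + 1))
        (PySem.List.pairwise_lt_pyRange_one _ _)
        (fun x hx => by
          rw [PySem.List.mem_pyRange_one]
          have := pv_mem_prod _ x hx
          exact ⟨this.1, this.2⟩)]
    rw [PySem.List.pyRange_one, List.flatMap_map, pv_alt_eq nr_t hneg]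
    rw [show (2*(nr_t.tdiv 2)*(nr_t.tdiv 2) + 1 - 0 : Int) = 2*(nr_t.tdiv 2)*(nr_t.tdiv 2) + 1 by ring]
    apply List.flatMap_congr
    intro k _
    apply List.filter_congr
    intro x hx
    have := pv_mem_prod _ x hx
    have h0 : (0 : Int) + (k : Int) = (k : Int) := by ring
    rw [h0, decide_eq_decide]
    omega

-- ===== VERDICT (by name: the statement is the Claim_ definition above) =====
theorem tarkasta_spec : Claim_equal_tarkasta := by
  intro nr_t _
  unfold Spec_tarkasta
  exact pv_tarkasta_eq_alt nr_t
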